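-- pv_equiv track=rewrite | github.com/NaNomicon/skills | scripts/generate_skill_badges.py | find_value_after_label
-- ===== SOURCE A (Python) =====
-- def find_value_after_label(items: list[str], label: str) -> str | None:
--     lowered = label.lower()
--     for index, item in enumerate(items):
--         if item.lower() == lowered:
--             for candidate in items[index + 1 :]:
--                 if candidate:
--                     return candidate
--     return None
-- ===== SOURCE B (Python) =====
-- def find_value_after_label(items: list[str], label: str) -> str | None:
--     lowered = label.lower()
--     seen = False
--     for item in items:
--         if seen and item:
--             return item
--         if item.lower() == lowered:
--             seen = True
--     return None
-- ===== Notes on version B (the rewrite author's own statement) =====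
-- stated objective: simpler
-- what changed: Replaced the nested enumerate-then-slice scan with one linear pass carrying a boolean 'seen the label' flag.
import Mathlib
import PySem

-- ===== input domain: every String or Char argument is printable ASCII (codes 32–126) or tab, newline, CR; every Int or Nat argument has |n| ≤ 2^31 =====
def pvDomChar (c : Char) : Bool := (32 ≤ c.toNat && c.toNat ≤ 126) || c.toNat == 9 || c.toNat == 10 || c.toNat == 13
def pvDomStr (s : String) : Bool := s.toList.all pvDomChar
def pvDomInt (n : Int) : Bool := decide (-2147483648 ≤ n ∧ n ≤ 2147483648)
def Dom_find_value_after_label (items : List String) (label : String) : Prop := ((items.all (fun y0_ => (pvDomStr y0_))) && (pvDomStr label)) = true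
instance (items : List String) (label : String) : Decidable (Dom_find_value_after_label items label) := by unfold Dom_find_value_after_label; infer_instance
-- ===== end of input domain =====

-- B replaces A's nested enumerate-then-slice scan by one linear pass with a 'seen' flag (simpler).

-- ===== PORT A =====
-- inner loop: 'for candidate in tail: if candidate: return candidate' (truthy str = nonempty)
def pvInnerA : List String → Option String
  | [] => none
  | c :: cs => if c ≠ "" then some c else pvInnerA cs

-- outer loop over enumerate(items); 'items[index+1:]' ported as PySem.List.slice
def pvOuterA (items : List String) (lowered : String) : List (Int × String) → Option String
  | [] => none
  | (i, item) :: rest =>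
    if PySem.Str.lower item == lowered then
      match pvInnerA (PySem.List.slice items (some (i + 1)) none) with
      | some v => some v
      | none => pvOuterA items lowered rest
    else pvOuterA items lowered rest

def find_value_after_label (items : List String) (label : String) : Option String :=
  let lowered := PySem.Str.lower label
  pvOuterA items lowered (PySem.List.enumerate items 0)

-- ===== PORT B =====
def pvAltLoop (lowered : String) (seen : Bool) : List String → Option String
  | [] => none
  | item :: rest =>
    if seen && item ≠ "" then some item
    else pvAltLoop lowered (seen || (PySem.Str.lower item == lowered)) rest

def find_value_after_label_alt (items : List String) (label : String) : Option String :=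
  let lowered := PySem.Str.lower label
  pvAltLoop lowered false items

-- ===== PRECONDITION & SPEC =====
def Spec_find_value_after_label (items : List String) (label : String) (out : Option String) : Prop := out = find_value_after_label_alt items label
instance (items : List String) (label : String) (out : Option String) : Decidable (Spec_find_value_after_label items label out) := by unfold Spec_find_value_after_label; infer_instance

-- ===== CLAIM (what is proved, stated in full; the proofs are below) =====
def Claim_equal_find_value_after_label : Prop := ∀ (items : List String) (label : String), Dom_find_value_after_label items label → Spec_find_value_after_label items label (find_value_after_label items label)

-- ===== LEMMAS AND PROOFS =====

-- once the flag is set, B's pass is exactly A's inner scan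
theorem pvAlt_true_eq_inner (lw : String) (l : List String) :
    pvAltLoop lw true l = pvInnerA l := by
  induction l with
  | nil => rfl
  | cons x rest ih =>
    simp only [pvAltLoop, pvInnerA, Bool.true_and, Bool.true_or]
    by_cases h : x = "" <;> simp [h, ih]

-- if A's inner scan finds nothing, B finds nothing either (all tail items are empty)
theorem pvAlt_none_of_inner_none (lw : String) : ∀ (l : List String),
    pvInnerA l = none → ∀ b, pvAltLoop lw b l = none := by
  intro l
  induction l with
  | nil => intro _ b; rfl
  | cons x rest ih =>
    intro h b
    by_cases hx : x = ""
    · have h' : pvInnerA rest = none := by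
        subst hx; simpa [pvInnerA] using h
      subst hx
      simp [pvAltLoop, ih h']
    · exfalso; simp [pvInnerA, hx] at h

theorem pvMain (lw : String) : ∀ (l pre : List String),
    pvOuterA (pre ++ l) lw (PySem.List.enumerate l (pre.length : Int)) =
      pvAltLoop lw false l := by
  intro l
  induction l with
  | nil => intro pre; simp [PySem.List.enumerate_nil, pvOuterA, pvAltLoop]
  | cons x rest ih =>
    intro pre
    rw [PySem.List.enumerate_cons]
    have hslice : PySem.List.slice (pre ++ x :: rest) (some ((pre.length : Int) + 1)) none = rest := by
      have : ((pre.length : Int) + 1) = ((pre.length + 1 : Nat) : Int) := by push_cast; ring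
      rw [this, PySem.List.slice_from_natCast]
      have : pre ++ x :: rest = (pre ++ [x]) ++ rest := by simp
      rw [this]
      have hlen : pre.length + 1 = (pre ++ [x]).length := by simp
      rw [hlen, List.drop_left]
    have hrec : pvOuterA (pre ++ x :: rest) lw (PySem.List.enumerate rest ((pre.length : Int) + 1)) = pvAltLoop lw false rest := by
      have h1 : pre ++ x :: rest = (pre ++ [x]) ++ rest := by simp
      have h2 : ((pre.length : Int) + 1) = (((pre ++ [x]).length : Nat) : Int) := by
        simp
      rw [h1, h2, ih]
    simp only [pvOuterA, pvAltLoop, Bool.false_and, Bool.false_or,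
      if_neg (by simp : ¬ (false = true))]
    by_cases hm : PySem.Str.lower x == lw
    · rw [if_pos hm, hslice, hm, pvAlt_true_eq_inner]
      cases hin : pvInnerA rest with
      | some v => simp
      | none => simp [hrec, pvAlt_none_of_inner_none lw rest hin false]
    · rw [if_neg hm, Bool.eq_false_iff.mpr hm, hrec]

-- ===== VERDICT (by name: the statement is the Claim_ definition above) =====
theorem find_value_after_label_spec : Claim_equal_find_value_after_label := by
  intro items label _
  unfold Spec_find_value_after_label find_value_after_label find_value_after_label_alt
  have := pvMain (PySem.Str.lower label) items []
  simpa using this
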